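-- pv_equiv track=rewrite | github.com/pypi-data/pypi-mirror-391 | packages/ngcsdk/ngcsdk-4.9.10-py3-none-any.whl/ngcbase/transfer/utils.py | bitmask_set_bit_in_size
-- ===== SOURCE A (Python) =====
-- def bitmask_is_bit_set(bitmask: int, index: int) -> bool:
--     """Checks if the bit at the specified index is set (1) in the bitmask.
--
--     Args:
--         bitmask (int): The bitmask to check.
--         index (int): The position of the bit to check.
--
--     Returns:
--         bool: True if the bit is set, False otherwise.
--     """  # noqa: D401
--     return bool(bitmask & (1 << index))
--
-- def bitmask_set_bit_in_size(bitmask: int, size: int, partition_size: int) -> int: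
--     """Calculates the total number of bits set in a bitmask for given partition sizes within a specified total size.
--
--     Args:
--         bitmask (int): Integer representation of the bitmask.
--         size (int): Total size in which bits are to be checked.
--         partition_size (int): Size of each partition to check for set bits.
--
--     Returns:
--         int: The total number of set bits calculated across all partitions.
--     """  # noqa: D401
--     assert size >= 0, "file size cannot be less than zero"
--     if size == 0:
--         return 0
--     n = (size - 1) // partition_size
--     total = 0
--     for i in range(n):
--         total += partition_size * bitmask_is_bit_set(bitmask, i)
--     total += (size % partition_size or partition_size) * bitmask_is_bit_set(bitmask, n)
--     return total
-- ===== SOURCE B (Python) =====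
-- def bitmask_set_bit_in_size(bitmask: int, size: int, partition_size: int) -> int:
--     assert size >= 0, "file size cannot be less than zero"
--     if size == 0:
--         return 0
--     n = (size - 1) // partition_size
--     full = partition_size * bin(bitmask & ((1 << n) - 1)).count("1")
--     return full + (size % partition_size or partition_size) * bool(bitmask & (1 << n))
-- ===== Notes on version B (the rewrite author's own statement) =====
-- stated objective: simpler
-- what changed: Replaced the per-bit accumulation loop over range(n) with a single closed-form term: partition_size times the popcount of the bitmask masked to its low n bits, plus the same last-partition term.
import Mathlib
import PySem

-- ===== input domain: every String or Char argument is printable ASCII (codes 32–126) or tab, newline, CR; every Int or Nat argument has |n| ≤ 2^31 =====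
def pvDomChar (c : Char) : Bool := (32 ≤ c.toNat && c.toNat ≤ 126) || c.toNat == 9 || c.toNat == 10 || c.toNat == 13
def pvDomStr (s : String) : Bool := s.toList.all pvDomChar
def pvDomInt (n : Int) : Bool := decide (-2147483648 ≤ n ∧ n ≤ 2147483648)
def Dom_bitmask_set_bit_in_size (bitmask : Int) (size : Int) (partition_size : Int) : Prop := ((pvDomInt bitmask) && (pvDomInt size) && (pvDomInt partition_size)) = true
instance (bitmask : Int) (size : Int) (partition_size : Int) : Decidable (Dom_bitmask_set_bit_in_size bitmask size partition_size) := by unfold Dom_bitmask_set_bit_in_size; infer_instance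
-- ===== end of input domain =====

-- B replaces A's per-bit accumulation loop by a closed-form masked-popcount term (simpler, no loop);
-- return-value equivalence is proved on all inputs where the Python A returns (Pre_ below).

-- ===== PORT A =====
def bitmask_is_bit_set (bitmask : Int) (index : Int) : Bool :=
  PySem.Int.band bitmask ((1 : Int) <<< index.toNat) ≠ 0

def bitmask_set_bit_in_size (bitmask : Int) (size : Int) (partition_size : Int) : Int :=
  if size = 0 then 0
  else
    let n := PySem.Int.floordiv (size - 1) partition_size
    let total := (PySem.List.pyRange 0 n 1).foldl
      (fun total i => total + partition_size * (if bitmask_is_bit_set bitmask i then 1 else 0)) 0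
    total + (if PySem.Int.mod size partition_size ≠ 0 then PySem.Int.mod size partition_size
             else partition_size) * (if bitmask_is_bit_set bitmask n then 1 else 0)

-- ===== PORT B =====
def bitmask_set_bit_in_size_alt (bitmask : Int) (size : Int) (partition_size : Int) : Int :=
  if size = 0 then 0
  else
    let n := PySem.Int.floordiv (size - 1) partition_size
    let full := partition_size *
      (PySem.Int.bitCount (PySem.Int.band bitmask (((1 : Int) <<< n.toNat) - 1)) : Int)
    full + (if PySem.Int.mod size partition_size ≠ 0 then PySem.Int.mod size partition_size
            else partition_size) *
           (if PySem.Int.band bitmask ((1 : Int) <<< n.toNat) ≠ 0 then 1 else 0)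

-- ===== PRECONDITION & SPEC =====
-- Pre_ is exactly where the Python A returns: size ≥ 0 (else AssertionError); for size > 0,
-- partition_size ≠ 0 (else ZeroDivisionError) and, unless size = 1, partition_size > 0
-- (a negative partition_size makes n negative and '1 << n' raise ValueError).
def Pre_bitmask_set_bit_in_size (bitmask : Int) (size : Int) (partition_size : Int) : Prop :=
  0 ≤ size ∧ (size = 0 ∨ (partition_size ≠ 0 ∧ (0 < partition_size ∨ size = 1)))
instance (bitmask : Int) (size : Int) (partition_size : Int) : Decidable (Pre_bitmask_set_bit_in_size bitmask size partition_size) := by unfold Pre_bitmask_set_bit_in_size; infer_instance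

def pvWitness_bitmask_set_bit_in_size : Int × Int × Int := (11, 10, 3)

def Spec_bitmask_set_bit_in_size (bitmask : Int) (size : Int) (partition_size : Int) (out : Int) : Prop := out = bitmask_set_bit_in_size_alt bitmask size partition_size
instance (bitmask : Int) (size : Int) (partition_size : Int) (out : Int) : Decidable (Spec_bitmask_set_bit_in_size bitmask size partition_size out) := by unfold Spec_bitmask_set_bit_in_size; infer_instance

-- ===== CLAIM (what is proved, stated in full; the proofs are below) =====
def Claim_equal_bitmask_set_bit_in_size : Prop := ∀ (bitmask : Int) (size : Int) (partition_size : Int), Dom_bitmask_set_bit_in_size bitmask size partition_size → Pre_bitmask_set_bit_in_size bitmask size partition_size → Spec_bitmask_set_bit_in_size bitmask size partition_size (bitmask_set_bit_in_size bitmask size partition_size)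

-- ===== LEMMAS AND PROOFS =====

theorem pv_emod_neg (c m : Nat) (hm : 0 < m) :
    (-(c:ℤ)-1) % (m:ℤ) = ((m - 1 - c % m : Nat) : ℤ) := by
  have hr : c % m < m := Nat.mod_lt _ hm
  have hd : (m:ℤ) * (c / m : Nat) + ((c % m : Nat) : ℤ) = c := by exact_mod_cast Nat.div_add_mod c m
  have h1 : (-(c:ℤ)-1) = ((m - 1 - c % m : Nat) : ℤ) + (m:ℤ) * (-((c / m : Nat):ℤ) - 1) := by
    have e1 : (m:ℤ) * (-((c / m : Nat):ℤ) - 1) = -((m:ℤ) * (c / m : Nat)) - m := by ring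
    rw [e1]; omega
  rw [h1, Int.add_mul_emod_self_left, Int.emod_eq_of_lt (by omega) (by omega)]

theorem pv_cast_pow (k : Nat) : ((2:ℤ)^k) = ((2^k : Nat) : ℤ) := by push_cast; ring

theorem pv_band_mask (b : Int) (k : Nat) :
    PySem.Int.band b (((1 : Int) <<< k) - 1) = b % (2 ^ k : Int) := by
  have hmpos : 0 < 2^k := Nat.two_pow_pos k
  have hmask : ((1:Int) <<< k) - 1 = ((2^k - 1 : Nat) : ℤ) := by
    rw [Int.shiftLeft_eq]; push_cast [Nat.one_le_two_pow]; ring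
  rw [hmask]
  by_cases hb : 0 ≤ b
  · rw [PySem.Int.band_of_nonneg hb (by positivity), Int.toNat_natCast,
      Nat.and_two_pow_sub_one_eq_mod]
    conv_rhs => rw [← Int.toNat_of_nonneg hb]
    push_cast
    rfl
  · obtain ⟨c, rfl⟩ : ∃ c : Nat, b = -(c:ℤ) - 1 := ⟨(-b-1).toNat, by omega⟩
    rw [PySem.Int.band.eq_1, if_neg hb, if_pos (by positivity), Int.toNat_natCast]
    have hc : (-(-(c:ℤ)-1) - 1).toNat = c := by omega
    rw [hc, Nat.land_comm, Nat.and_two_pow_sub_one_eq_mod, pv_cast_pow, pv_emod_neg c _ hmpos]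

theorem pv_band_pow (b : Int) (k : Nat) :
    (PySem.Int.band b ((1 : Int) <<< k) = 0 ∧ b % (2 ^ (k+1) : Int) = b % (2 ^ k : Int)) ∨
    (PySem.Int.band b ((1 : Int) <<< k) = 2 ^ k ∧
      b % (2 ^ (k+1) : Int) = b % (2 ^ k : Int) + 2 ^ k) := by
  have hmpos : 0 < 2^k := Nat.two_pow_pos k
  have hmpos' : 0 < 2^(k+1) := Nat.two_pow_pos (k+1)
  have hpow : (2:Nat)^(k+1) = 2^k + 2^k := by ring
  have hsh : ((1:Int) <<< k) = ((2^k : Nat) : ℤ) := by rw [Int.shiftLeft_eq]; push_cast; ring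
  rw [hsh, pv_cast_pow k, pv_cast_pow (k+1)]
  by_cases hb : 0 ≤ b
  · obtain ⟨m, rfl⟩ : ∃ m : Nat, b = (m:ℤ) := ⟨b.toNat, by omega⟩
    rw [PySem.Int.band_natCast, ← Int.natCast_mod, ← Int.natCast_mod]
    have hstep : m % 2^(k+1) = m % 2^k + 2^k * (m / 2^k % 2) := Nat.mod_pow_succ
    have hand : m &&& 2^k = (m.testBit k).toNat * 2^k := Nat.and_two_pow m k
    have htb : (m.testBit k).toNat = m / 2^k % 2 := Nat.toNat_testBit m k
    cases h : m.testBit k <;>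
      simp only [h, Bool.toNat_false, Bool.toNat_true, zero_mul, one_mul] at hand htb
    · left
      refine ⟨by rw [hand]; simp, ?_⟩
      rw [hstep, ← htb, mul_zero, add_zero]
    · right
      refine ⟨by rw [hand], ?_⟩
      rw [hstep, ← htb, mul_one]
      push_cast; ring
  · obtain ⟨c, rfl⟩ : ∃ c : Nat, b = -(c:ℤ) - 1 := ⟨(-b-1).toNat, by omega⟩
    have hc : (-(-(c:ℤ)-1) - 1).toNat = c := by omega
    rw [PySem.Int.band.eq_1, if_neg hb, if_pos (by positivity), Int.toNat_natCast,
      pv_emod_neg c _ hmpos, pv_emod_neg c _ hmpos', hc, Nat.land_comm]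
    have hstep : c % 2^(k+1) = c % 2^k + 2^k * (c / 2^k % 2) := Nat.mod_pow_succ
    have hand : c &&& 2^k = (c.testBit k).toNat * 2^k := Nat.and_two_pow c k
    have htb : (c.testBit k).toNat = c / 2^k % 2 := Nat.toNat_testBit c k
    have hrk : c % 2^k < 2^k := Nat.mod_lt _ hmpos
    cases h : c.testBit k <;>
      simp only [h, Bool.toNat_false, Bool.toNat_true, zero_mul, one_mul] at hand htb
    · right
      refine ⟨by rw [hand]; norm_num, ?_⟩
      rw [hstep, ← htb, mul_zero, add_zero, hpow]
      generalize (2:ℕ)^k = M at hrk ⊢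
      omega
    · left
      refine ⟨by rw [hand]; simp, ?_⟩
      rw [hstep, ← htb, mul_one, hpow]
      generalize (2:ℕ)^k = M at hrk ⊢
      omega

theorem pv_bitCount_add_pow (k : Nat) : ∀ e : Nat, e < 2 ^ k →
    PySem.Int.bitCount ((e + 2 ^ k : Nat) : Int) = PySem.Int.bitCount (e : Int) + 1 := by
  induction k with
  | zero =>
    intro e he
    interval_cases e
    decide
  | succ k ih =>
    intro e he
    have hm : 0 < e + 2^(k+1) := by positivity
    rw [PySem.Int.bitCount_natCast hm]
    have h2 : (e + 2^(k+1)) % 2 = e % 2 := by omega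
    have h3 : (e + 2^(k+1)) / 2 = e / 2 + 2^k := by omega
    have h4 : e / 2 < 2^k := by omega
    rw [h2, h3, ih _ h4]
    by_cases he0 : e = 0
    · subst he0; simp
    · rw [PySem.Int.bitCount_natCast (Nat.pos_of_ne_zero he0)]
      omega

theorem pv_loop_eq (b p : Int) (n : Nat) :
    (PySem.List.pyRange 0 (n : Int) 1).foldl
      (fun total i => total + p * (if bitmask_is_bit_set b i then 1 else 0)) 0
    = p * (PySem.Int.bitCount (PySem.Int.band b (((1 : Int) <<< n) - 1)) : Int) := by
  induction n with
  | zero => simp [PySem.List.pyRange, PySem.Int.band_zero, PySem.Int.bitCount_zero]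
  | succ n ih =>
    have hr : PySem.List.pyRange 0 ((n:Int) + 1) 1 = PySem.List.pyRange 0 (n:Int) 1 ++ [(n:Int)] := by
      exact PySem.List.pyRange_one_succ_right (by omega)
    rw [show ((n+1 : Nat) : Int) = (n:Int) + 1 by push_cast; ring, hr, List.foldl_append]
    simp only [List.foldl_cons, List.foldl_nil]
    rw [ih]
    have hmask := pv_band_mask b n
    have hmask' := pv_band_mask b (n+1)
    have hnn : (0:ℤ) ≤ b % 2^n := Int.emod_nonneg b (by positivity)
    have hlt : b % 2^n < 2^n := Int.emod_lt_of_pos b (by positivity)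
    rcases pv_band_pow b n with ⟨h0, he⟩ | ⟨h1, he⟩
    · have : bitmask_is_bit_set b (n:Int) = false := by
        simp [bitmask_is_bit_set, Int.toNat_natCast, h0]
      rw [this, hmask, hmask', he, ← hmask]
      simp
    · have : bitmask_is_bit_set b (n:Int) = true := by
        simp only [bitmask_is_bit_set, Int.toNat_natCast, h1]
        simp
      rw [this, hmask, hmask', he]
      have he2 : b % 2^(n+1) = b % 2^n + 2^n := he
      have hc : (b % 2^n + 2^n : ℤ) = (((b % 2^n).toNat + 2^n : Nat) : ℤ) := by
        push_cast; omega
      rw [hc, pv_bitCount_add_pow n _ (by omega)]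
      rw [show (((b % 2^n).toNat : Nat) : ℤ) = b % 2^n from by omega]
      simp
      ring

-- ===== VERDICT (by name: the statement is the Claim_ definition above) =====
theorem bitmask_set_bit_in_size_spec : Claim_equal_bitmask_set_bit_in_size := by
  intro b s p _ hpre
  unfold Spec_bitmask_set_bit_in_size bitmask_set_bit_in_size bitmask_set_bit_in_size_alt
  by_cases hs : s = 0
  · simp [hs]
  · simp only [if_neg hs]
    have hn : 0 ≤ PySem.Int.floordiv (s - 1) p := by
      rcases hpre with ⟨hs0, h⟩
      rcases h with h0 | ⟨hp0, hp⟩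
      · exact absurd h0 hs
      · rcases hp with hp | h1
        · rw [PySem.Int.floordiv_eq_ediv_of_pos hp]
          exact Int.ediv_nonneg (by omega) (by omega)
        · simp [h1, PySem.Int.floordiv]
    set n := PySem.Int.floordiv (s - 1) p with hn_def
    have hcast : (n.toNat : Int) = n := Int.toNat_of_nonneg hn
    rw [← hcast, pv_loop_eq]
    simp [bitmask_is_bit_set, max_eq_left hn]
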